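-- pv_equiv track=rewrite | github.com/LiamKujawski/MCP | scripts/trigger_experiment.py | extract_research_topics
-- ===== SOURCE A (Python) =====
-- from typing import Dict, List, Optional
--
-- def extract_research_topics(files: List[str]) -> Dict[str, List[str]]:
--     """Extract unique research topics and models from file paths."""
--     topics = {}
--
--     for file in files:
--         parts = file.split("/")
--         if len(parts) >= 3:  # research/<topic>/<model>/...
--             topic = parts[1]
--             model = parts[2]
--
--             if topic not in topics:
--                 topics[topic] = []
--             if model not in topics[topic]:
--                 topics[topic].append(model)
--
--     return topics
-- ===== SOURCE B (Python) =====
-- def extract_research_topics(files):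
--     """Extract unique research topics and models from file paths."""
--     # Phase 1: group every model occurrence (duplicates included) under its topic.
--     grouped = {}
--     for file in files:
--         parts = file.split("/")
--         if len(parts) >= 3:  # research/<topic>/<model>/...
--             grouped.setdefault(parts[1], []).append(parts[2])
--     # Phase 2: dedup each topic's models, keeping first-seen order.
--     return {topic: list(dict.fromkeys(models)) for topic, models in grouped.items()}
-- ===== Notes on version B (the rewrite author's own statement) =====
-- stated objective: alternative
-- what changed: A dedups inline with a membership test on each topic's list while inserting; B is a two-phase pipeline: first group every model occurrence per topic via setdefault/append (duplicates kept), then a dict comprehension dedups each list with dict.fromkeys preserving first-seen order.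
import Mathlib
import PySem

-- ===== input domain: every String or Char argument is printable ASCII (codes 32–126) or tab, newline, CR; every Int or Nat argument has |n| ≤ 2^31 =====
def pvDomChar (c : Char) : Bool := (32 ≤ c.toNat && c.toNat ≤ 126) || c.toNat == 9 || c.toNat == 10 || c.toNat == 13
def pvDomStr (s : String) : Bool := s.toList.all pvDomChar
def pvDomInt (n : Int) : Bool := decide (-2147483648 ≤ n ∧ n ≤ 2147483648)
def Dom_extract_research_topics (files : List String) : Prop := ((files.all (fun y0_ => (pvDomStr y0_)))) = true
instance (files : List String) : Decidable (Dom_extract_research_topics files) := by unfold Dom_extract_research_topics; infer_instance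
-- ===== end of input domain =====

-- B replaces A's inline membership-test dedup inside the loop by two separate passes
-- (phase 1 groups every model occurrence under its topic, phase 2 dedups each list
-- keeping first-seen order); same cost, alternative decomposition.

-- ===== PORT A =====
-- file.split("/") with the non-empty separator "/" is PySem.Chars.splitOn (exact).
def extract_research_topics (files : List String) : List (String × List String) :=
  (files.foldl (fun topics file =>
      let parts := (PySem.Chars.splitOn file.toList ['/']).map String.ofList
      if h : 3 ≤ parts.length then
        let topic := parts[1]'(by omega)
        let model := parts[2]'(by omega)
        let topics := if topics.contains topic then topics else topics.insert topic []
        if (topics.getD topic []).contains model then topics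
        else topics.insert topic ((topics.getD topic []) ++ [model])
      else topics)
    PySem.Dict.empty).items

-- ===== PORT B =====
-- grouped.setdefault(parts[1], []).append(parts[2]) is Dict.modify parts[1] [] (· ++ [parts[2]]);
-- list(dict.fromkeys(models)) is PySem.List.dedup.
def extract_research_topics_alt (files : List String) : List (String × List String) :=
  let grouped := files.foldl (fun grouped file =>
      let parts := (PySem.Chars.splitOn file.toList ['/']).map String.ofList
      if h : 3 ≤ parts.length then
        grouped.modify (parts[1]'(by omega)) [] (· ++ [parts[2]'(by omega)])
      else grouped)
    PySem.Dict.empty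
  grouped.items.map (fun p => (p.1, PySem.List.dedup p.2))

-- ===== PRECONDITION & SPEC =====
def Spec_extract_research_topics (files : List String) (out : List (String × List String)) : Prop := out = extract_research_topics_alt files
instance (files : List String) (out : List (String × List String)) : Decidable (Spec_extract_research_topics files out) := by unfold Spec_extract_research_topics; infer_instance

-- ===== CLAIM (what is proved, stated in full; the proofs are below) =====
def Claim_equal_extract_research_topics : Prop := ∀ (files : List String), Dom_extract_research_topics files → Spec_extract_research_topics files (extract_research_topics files)

-- ===== LEMMAS AND PROOFS =====

theorem modify_eq_insert (d : PySem.Dict String (List String)) (k : String) (f : List String → List String) :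
    d.modify k [] f = d.insert k (f (d.getD k [])) := rfl

theorem keys_eq_of_items_map (dA dB : PySem.Dict String (List String))
    (hinv : dA.items = dB.items.map (fun p => (p.1, PySem.List.dedup p.2))) :
    dA.keys = dB.keys := by
  simp only [PySem.Dict.keys, hinv, List.map_map]; rfl

theorem step_inv (dA dB : PySem.Dict String (List String)) (hnd : dB.keys.Nodup)
    (hinv : dA.items = dB.items.map (fun p => (p.1, PySem.List.dedup p.2)))
    (t m : String) :
    (let dA' := if dA.contains t then dA else dA.insert t []
     if (dA'.getD t []).contains m then dA'
     else dA'.insert t ((dA'.getD t []) ++ [m])).items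
    = (dB.modify t [] (· ++ [m])).items.map (fun p => (p.1, PySem.List.dedup p.2)) := by
  have hkeys : dA.keys = dB.keys := keys_eq_of_items_map dA dB hinv
  have hndA : dA.keys.Nodup := hkeys ▸ hnd
  have hcont : dA.contains t = dB.contains t := by
    rw [PySem.Dict.contains_eq_decide_mem_keys, PySem.Dict.contains_eq_decide_mem_keys, hkeys]
  rw [modify_eq_insert]
  by_cases hc : dB.contains t = true
  · -- t present in both
    obtain ⟨vB, hget⟩ : ∃ v, dB.get? t = some v := by
      have := PySem.Dict.contains_eq_isSome_get? dB t
      rw [hc] at this; exact Option.isSome_iff_exists.mp this.symm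
    have hmemB : (t, vB) ∈ dB.items := PySem.Dict.mem_items_of_get?_eq_some dB hget
    have hgetDB : dB.getD t [] = vB := PySem.Dict.getD_of_mem_items dB hmemB hnd []
    have hmemA : (t, PySem.List.dedup vB) ∈ dA.items := by
      rw [hinv]; exact List.mem_map.mpr ⟨(t, vB), hmemB, rfl⟩
    have hgetDA : dA.getD t [] = PySem.List.dedup vB := PySem.Dict.getD_of_mem_items dA hmemA hndA []
    have hcA : dA.contains t = true := hcont.trans hc
    simp only [hcA, if_true, hgetDA, hgetDB]
    by_cases hm : m ∈ vB
    · have hcm : (PySem.List.dedup vB).contains m = true := by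
        simp [PySem.List.dedup_eq_ofList, PySem.Set.mem_ofList, hm]
      rw [if_pos hcm]
      have hded : PySem.Set.ofList (vB ++ [m]) = PySem.Set.ofList vB := by
        rw [PySem.Set.ofList_append_singleton]
        exact PySem.Set.add_of_mem (by simp [PySem.Set.mem_ofList, hm])
      rw [PySem.Dict.items_insert_of_contains dB _ hc, List.map_map, hinv]
      apply List.map_congr_left
      intro p hp
      by_cases hpt : p.1 = t
      · have hpv : p = (t, vB) := by
          have h2 : dB.getD p.1 [] = p.2 := PySem.Dict.getD_of_mem_items dB (by simpa using hp) hnd []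
          rw [hpt, hgetDB] at h2
          exact Prod.ext hpt h2.symm
        subst hpv
        simp [hded]
      · simp [Function.comp, hpt]
    · have hcm : (PySem.List.dedup vB).contains m = false := by
        simp [PySem.List.dedup_eq_ofList, PySem.Set.mem_ofList, hm]
      rw [if_neg (by simp only [hcm]; exact Bool.false_ne_true)]
      have hded : PySem.Set.ofList (vB ++ [m]) = PySem.Set.ofList vB ++ [m] := by
        rw [PySem.Set.ofList_append_singleton]
        exact PySem.Set.add_of_not_mem (by simp [PySem.Set.mem_ofList, hm])
      rw [PySem.Dict.items_insert_of_contains dA _ hcA,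
          PySem.Dict.items_insert_of_contains dB _ hc, hinv, List.map_map, List.map_map]
      apply List.map_congr_left
      intro p hp
      by_cases hpt : p.1 = t <;> simp [Function.comp, hpt, hded]
  · -- t fresh in both
    have hcB : dB.contains t = false := eq_false_of_ne_true hc
    have hcA : dA.contains t = false := hcont.trans hcB
    have hcA' : (dA.insert t []).contains t = true := PySem.Dict.contains_insert_self dA t []
    simp only [hcA, Bool.false_eq_true, if_false]
    rw [PySem.Dict.getD_insert_self]
    simp only [List.contains_nil, Bool.false_eq_true, if_false, List.nil_append]
    rw [PySem.Dict.getD_of_not_contains dB [] hcB]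
    rw [PySem.Dict.items_insert_of_contains (dA.insert t []) _ hcA',
        PySem.Dict.items_insert_of_not_contains dA _ hcA,
        PySem.Dict.items_insert_of_not_contains dB _ hcB]
    rw [List.map_append, List.map_append]
    have hnot : ∀ p ∈ dA.items, (p.1 == t) = false := by
      intro p hp
      have hpk : p.1 ∈ dA.keys := by
        simp only [PySem.Dict.keys]; exact List.mem_map.mpr ⟨p, hp, rfl⟩
      have ht : t ∉ dA.keys := by
        intro hmem
        have := (PySem.Dict.contains_iff_mem_keys dA t).mpr hmem
        rw [hcA] at this; exact Bool.false_ne_true this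
      simp only [beq_eq_false_iff_ne, ne_eq]
      intro h; exact ht (h ▸ hpk)
    congr 1
    · rw [← hinv]
      conv_rhs => rw [← List.map_id dA.items]
      apply List.map_congr_left
      intro p hp
      simp only [hnot p hp, Bool.false_eq_true, if_false, id]
    · simp [PySem.Set.ofList_eq_self_of_nodup [m] (List.nodup_singleton m)]

theorem fold_inv (files : List String) (dA dB : PySem.Dict String (List String))
    (hnd : dB.keys.Nodup)
    (hinv : dA.items = dB.items.map (fun p => (p.1, PySem.List.dedup p.2))) :
    (files.foldl (fun topics file =>
      let parts := (PySem.Chars.splitOn file.toList ['/']).map String.ofList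
      if h : 3 ≤ parts.length then
        let topic := parts[1]'(by omega)
        let model := parts[2]'(by omega)
        let topics := if topics.contains topic then topics else topics.insert topic []
        if (topics.getD topic []).contains model then topics
        else topics.insert topic ((topics.getD topic []) ++ [model])
      else topics) dA).items
    = ((files.foldl (fun grouped file =>
      let parts := (PySem.Chars.splitOn file.toList ['/']).map String.ofList
      if h : 3 ≤ parts.length then
        grouped.modify (parts[1]'(by omega)) [] (· ++ [parts[2]'(by omega)])
      else grouped) dB).items).map (fun p => (p.1, PySem.List.dedup p.2)) := by
  induction files generalizing dA dB with
  | nil => simpa using hinv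
  | cons file rest ih =>
    simp only [List.foldl_cons]
    by_cases h : 3 ≤ ((PySem.Chars.splitOn file.toList ['/']).map String.ofList).length
    · simp only [dif_pos h]
      apply ih
      · rw [modify_eq_insert]
        exact PySem.Dict.nodup_keys_insert dB _ _ hnd
      · exact step_inv dA dB hnd hinv _ _
    · simp only [dif_neg h]
      exact ih dA dB hnd hinv

-- ===== VERDICT (by name: the statement is the Claim_ definition above) =====
theorem extract_research_topics_spec : Claim_equal_extract_research_topics := by
  intro files _
  unfold Spec_extract_research_topics extract_research_topics extract_research_topics_alt
  exact fold_inv files _ _ (PySem.Dict.nodup_keys_empty) rfl
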